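-- pv_equiv track=rewrite | github.com/softwareandgineer/softwareandgineer | Think/Ch5/Ch5_HW1.py | find_letters
-- ===== SOURCE A (Python) =====
-- def find_letters(wrd, x, loc=0):
--     pos = -1
--     start = -1
--     while True:
--         start = pos+1
--         pos = wrd.find(x, start)
--         if pos == -1:
--             break
--
--     if loc:
--         loc = start
--
--     return start
-- ===== SOURCE B (Python) =====
-- def find_letters(wrd, x, loc=0):
--     return wrd.rfind(x) + 1
-- ===== Notes on version B (the rewrite author's own statement) =====
-- stated objective: simpler
-- what changed: Replaced the forward occurrence-by-occurrence while-loop (repeated wrd.find advancing one past each hit) and the dead loc branch with a single reverse search: return wrd.rfind(x) + 1.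
import Mathlib
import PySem

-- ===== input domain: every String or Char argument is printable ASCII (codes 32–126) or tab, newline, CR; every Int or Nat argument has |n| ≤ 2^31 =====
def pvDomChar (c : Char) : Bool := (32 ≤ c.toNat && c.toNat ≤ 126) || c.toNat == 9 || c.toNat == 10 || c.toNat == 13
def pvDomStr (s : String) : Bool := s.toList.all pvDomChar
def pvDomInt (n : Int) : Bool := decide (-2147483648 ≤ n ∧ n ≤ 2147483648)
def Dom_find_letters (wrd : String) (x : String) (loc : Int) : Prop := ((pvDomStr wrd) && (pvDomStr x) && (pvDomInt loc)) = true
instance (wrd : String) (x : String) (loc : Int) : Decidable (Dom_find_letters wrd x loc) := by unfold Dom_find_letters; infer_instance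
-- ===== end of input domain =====

-- B replaces A's forward scan over every occurrence with one built-in reverse search (rfind + 1): simpler.
-- A's `if loc: loc = start` branch only rebinds a local and is dead; both ports return the same value for every loc.

-- ===== PORT A =====
-- the `while True` loop: start := pos+1; pos := wrd.find(x, start); break when pos == -1; returns start.
-- Termination: each found position is > pos and ≤ len(wrd)  (find_letters_loop_step below).
theorem find_letters_findFrom_bounds (s sub : List Char) (pos : Int) :
    PySem.Chars.findFrom s sub (pos + 1) none ≠ -1 →
    pos < PySem.Chars.findFrom s sub (pos + 1) none ∧
      PySem.Chars.findFrom s sub (pos + 1) none ≤ (s.length : Int) := by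
  unfold PySem.Chars.findFrom
  intro h
  set n : Int := (s.length : Int) with hn
  set st : Int := (if pos + 1 < 0 then (if pos + 1 + n < 0 then 0 else pos + 1 + n) else pos + 1) with hst
  by_cases hlt : n < st
  · rw [if_pos hlt] at h ⊢; exact absurd rfl h
  · rw [if_neg hlt] at h ⊢
    set r : Int := PySem.Chars.find (List.drop st.toNat (List.take n.toNat s)) sub with hr
    by_cases hr1 : r = -1
    · rw [if_pos hr1] at h; exact absurd rfl h
    · rw [if_neg hr1] at h ⊢
      have hr0 : 0 ≤ r := by
        have := PySem.Chars.neg_one_le_find (List.drop st.toNat (List.take n.toNat s)) sub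
        rw [← hr] at this; omega
      have hst0 : 0 ≤ st := by rw [hst]; split_ifs <;> omega
      have hrle : r ≤ ((List.drop st.toNat (List.take n.toNat s)).length : Int) := by
        have := PySem.Chars.find_le_length (List.drop st.toNat (List.take n.toNat s)) sub
        rw [← hr] at this; exact this
      have hlen : ((List.drop st.toNat (List.take n.toNat s)).length : Int) ≤ n - st := by
        simp [List.length_drop, hn]
        omega
      have hpst : pos < st := by rw [hst]; split_ifs <;> omega
      constructor
      · omega
      · omega

def find_letters_loop (wrd x : String) (pos : Int) : Int :=
  -- start = pos+1; pos = wrd.find(x, start)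
  let start := pos + 1
  let p := PySem.Str.findFrom wrd x start
  if p = -1 then start else find_letters_loop wrd x p
termination_by ((wrd.toList.length : Int) + 1 - pos).toNat
decreasing_by
  have h := find_letters_findFrom_bounds wrd.toList x.toList pos (by
    simpa [PySem.Str.findFrom_eq] using ‹¬ _›)
  simp only [PySem.Str.findFrom_eq] at *
  omega

def find_letters (wrd : String) (x : String) (loc : Int) : Int :=
  -- pos = -1; start = -1; while True: …   (the `if loc: loc = start` rebinds a dead local)
  find_letters_loop wrd x (-1)

-- ===== PORT B =====
def find_letters_alt (wrd : String) (x : String) (loc : Int) : Int :=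
  PySem.Str.rfind wrd x + 1

-- ===== PRECONDITION & SPEC =====
def Spec_find_letters (wrd : String) (x : String) (loc : Int) (out : Int) : Prop := out = find_letters_alt wrd x loc
instance (wrd : String) (x : String) (loc : Int) (out : Int) : Decidable (Spec_find_letters wrd x loc out) := by unfold Spec_find_letters; infer_instance

-- ===== CLAIM (what is proved, stated in full; the proofs are below) =====
def Claim_equal_find_letters : Prop := ∀ (wrd : String) (x : String) (loc : Int), Dom_find_letters wrd x loc → Spec_find_letters wrd x loc (find_letters wrd x loc)

-- ===== LEMMAS AND PROOFS =====

theorem pv_go_spec (s sub : List Char) :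
    ∀ j : Nat,
      (PySem.Chars.rfind.go s sub j = -1 ↔ ∀ i : Nat, i ≤ j → ¬ sub <+: s.drop i) ∧
      (PySem.Chars.rfind.go s sub j ≠ -1 →
        ∃ i : Nat, PySem.Chars.rfind.go s sub j = (i : Int) ∧ i ≤ j ∧ sub <+: s.drop i ∧
          ∀ m : Nat, i < m → m ≤ j → ¬ sub <+: s.drop m) := by
  intro j
  induction j with
  | zero =>
    simp only [PySem.Chars.rfind.go]
    by_cases hp : sub.isPrefixOf s
    · rw [if_pos hp]
      constructor
      · constructor
        · intro h; omega
        · intro h; exact absurd (h 0 le_rfl) (by simpa using (List.isPrefixOf_iff_prefix.mp hp))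
      · intro _
        exact ⟨0, rfl, le_rfl, by simpa using List.isPrefixOf_iff_prefix.mp hp, by omega⟩
    · rw [if_neg hp]
      constructor
      · constructor
        · intro _ i hi
          interval_cases i
          simpa using fun h => hp (List.isPrefixOf_iff_prefix.mpr h)
        · intro _; rfl
      · intro h; exact absurd rfl h
  | succ j ih =>
    have hgo : PySem.Chars.rfind.go s sub (j + 1) =
        if sub.isPrefixOf (s.drop (j + 1)) then ((j : Int) + 1) else PySem.Chars.rfind.go s sub j := by
      simp only [PySem.Chars.rfind.go]
      push_cast
      rfl
    rw [hgo]
    by_cases hp : sub.isPrefixOf (s.drop (j + 1))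
    · rw [if_pos hp]
      constructor
      · constructor
        · intro h; omega
        · intro h
          exact absurd (h (j + 1) le_rfl) (by simpa using List.isPrefixOf_iff_prefix.mp hp)
      · intro _
        refine ⟨j + 1, by push_cast; ring, le_rfl, List.isPrefixOf_iff_prefix.mp hp, ?_⟩
        intro m h1 h2; omega
    · rw [if_neg hp]
      constructor
      · constructor
        · intro h i hi
          rcases Nat.lt_succ_iff_lt_or_eq.mp (Nat.lt_succ_of_le hi) with _ | heq
          · rcases Nat.le_succ_iff.mp hi with h' | h'
            · exact (ih.1.mp h) i (Nat.lt_succ_iff.mp (Nat.lt_succ_of_le h'))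
            · subst h'; exact fun hc => hp (List.isPrefixOf_iff_prefix.mpr hc)
          · subst heq; exact fun hc => hp (List.isPrefixOf_iff_prefix.mpr hc)
        · intro h
          exact ih.1.mpr (fun i hi => h i (Nat.le_succ_of_le hi))
      · intro h
        obtain ⟨i, hi1, hi2, hi3, hi4⟩ := ih.2 h
        refine ⟨i, hi1, Nat.le_succ_of_le hi2, hi3, ?_⟩
        intro m h1 h2
        rcases Nat.le_succ_iff.mp h2 with h' | h'
        · exact hi4 m h1 (Nat.lt_succ_iff.mp (Nat.lt_succ_of_le h'))
        · subst h'; exact fun hc => hp (List.isPrefixOf_iff_prefix.mpr hc)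

-- Python's quirk: find(sub, start) with start past the length is -1, even for sub = ''.
theorem pv_findFrom_gt_len (s sub : List Char) (k : Int) (h : (s.length : Int) < k) :
    PySem.Chars.findFrom s sub k none = -1 := by
  have h0 : ¬ k < 0 := by omega
  simp [PySem.Chars.findFrom, h0, h]

-- an occurrence strictly beyond every occurrence index i (≤ n maximal) forces none at all past i, unless i = n
theorem pv_no_occ_above (s sub : List Char) (i : Nat) (hin : i < s.length)
    (hmax : ∀ m : Nat, i < m → m ≤ s.length → ¬ sub <+: s.drop m) :
    ∀ m : Nat, i < m → ¬ sub <+: s.drop m := by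
  intro m hm hocc
  by_cases hmn : m ≤ s.length
  · exact hmax m hm hmn hocc
  · have hnil : s.drop m = [] := List.drop_eq_nil_of_le (by omega)
    rw [hnil] at hocc
    have hsub : sub = [] := List.prefix_nil.mp hocc
    exact hmax s.length hin le_rfl (by simp [hsub])

theorem pv_loop_reach (wrd x : String) (i : Nat)
    (hi2 : i ≤ wrd.toList.length)
    (hi3 : x.toList <+: wrd.toList.drop i)
    (hi4 : ∀ m : Nat, i < m → m ≤ wrd.toList.length → ¬ x.toList <+: wrd.toList.drop m) :
    ∀ d : Nat, ∀ pos : Int, -1 ≤ pos → pos ≤ (i : Int) →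
      ((i : Int) - pos).toNat = d → find_letters_loop wrd x pos = (i : Int) + 1 := by
  intro d
  induction d using Nat.strong_induction_on with
  | _ d ih =>
    intro pos h1 h2 hd
    rw [find_letters_loop]
    simp only [PySem.Str.findFrom_eq]
    by_cases hpi : pos = (i : Int)
    · subst hpi
      have hfneg : PySem.Chars.findFrom wrd.toList x.toList ((i : Int) + 1) none = -1 := by
        by_cases hin : i < wrd.toList.length
        · have hk : ((i + 1 : Nat) : Int) = (i : Int) + 1 := by push_cast; ring
          rw [← hk]
          rw [PySem.Chars.findFrom_natCast_eq_neg_one_iff wrd.toList x.toList (i + 1) (by omega)]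
          intro hinf
          have : ∃ j, x.toList <+: (wrd.toList.drop (i + 1)).drop j := by
            refine (PySem.Chars.exists_prefix_drop_iff_isIn x.toList (wrd.toList.drop (i + 1))).mpr ?_
            exact (PySem.Chars.isIn_iff_infix x.toList (wrd.toList.drop (i + 1))).mpr hinf
          obtain ⟨j, hj⟩ := this
          rw [List.drop_drop] at hj
          exact pv_no_occ_above wrd.toList x.toList i hin hi4 (i + 1 + j) (by omega) hj
        · exact pv_findFrom_gt_len wrd.toList x.toList ((i : Int) + 1) (by omega)
      rw [if_pos hfneg]
    · -- pos < i : the find succeeds and lands on an occurrence ≤ i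
      have hposlt : pos < (i : Int) := lt_of_le_of_ne h2 hpi
      set k : Nat := (pos + 1).toNat with hk
      have hkc : ((k : Nat) : Int) = pos + 1 := Int.toNat_of_nonneg (by omega)
      have hkle : k ≤ wrd.toList.length := by omega
      have hfne : PySem.Chars.findFrom wrd.toList x.toList ((k : Nat) : Int) none ≠ -1 := by
        rw [ne_eq, PySem.Chars.findFrom_natCast_eq_neg_one_iff wrd.toList x.toList k hkle]
        simp only [not_not]
        refine (PySem.Chars.isIn_iff_infix x.toList (wrd.toList.drop k)).mp ?_
        refine (PySem.Chars.exists_prefix_drop_iff_isIn x.toList (wrd.toList.drop k)).mp ?_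
        refine ⟨i - k, ?_⟩
        rw [List.drop_drop, show k + (i - k) = i from by omega]
        exact hi3
      obtain ⟨hge, hocc, hmin⟩ := PySem.Chars.findFrom_natCast_spec wrd.toList x.toList k hkle hfne
      set p : Int := PySem.Chars.findFrom wrd.toList x.toList ((k : Nat) : Int) none with hp
      have hple : p.toNat ≤ i := by
        by_contra hgt
        exact hmin i (by omega) (by omega) hi3
      have hp0 : 0 ≤ p := by omega
      rw [hkc] at hp
      rw [← hp]
      rw [if_neg hfne]
      exact ih ((i : Int) - p).toNat (by omega) p (by omega) (by omega) rfl

theorem pv_loop_eq (wrd x : String) : find_letters_loop wrd x (-1) = PySem.Str.rfind wrd x + 1 := by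
  have hr : PySem.Str.rfind wrd x = PySem.Chars.rfind wrd.toList x.toList := by
    simp [PySem.Str.rfind_eq]
  rw [hr]
  have hspec := pv_go_spec wrd.toList x.toList wrd.toList.length
  by_cases hrn : PySem.Chars.rfind wrd.toList x.toList = -1
  · -- no occurrence anywhere: the first find already fails, loop returns 0
    have hnone : ∀ i : Nat, i ≤ wrd.toList.length → ¬ x.toList <+: wrd.toList.drop i := by
      have := hspec.1.mp hrn
      exact this
    rw [hrn]
    rw [find_letters_loop]
    simp only [PySem.Str.findFrom_eq]
    have h0 : ((0 : Nat) : Int) = -1 + 1 := by norm_num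
    have hfneg : PySem.Chars.findFrom wrd.toList x.toList (-1 + 1) none = -1 := by
      rw [← h0, PySem.Chars.findFrom_natCast_eq_neg_one_iff wrd.toList x.toList 0 (by omega)]
      intro hinf
      have : ∃ j, x.toList <+: (wrd.toList.drop 0).drop j := by
        refine (PySem.Chars.exists_prefix_drop_iff_isIn x.toList (wrd.toList.drop 0)).mpr ?_
        exact (PySem.Chars.isIn_iff_infix x.toList (wrd.toList.drop 0)).mpr hinf
      obtain ⟨j, hj⟩ := this
      simp only [List.drop_zero] at hj
      by_cases hjn : j ≤ wrd.toList.length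
      · exact hnone j hjn hj
      · have hnil : wrd.toList.drop j = [] := List.drop_eq_nil_of_le (by omega)
        rw [hnil] at hj
        have hsub : x.toList = [] := List.prefix_nil.mp hj
        exact hnone wrd.toList.length le_rfl (by simp [hsub])
    rw [if_pos hfneg]
  · obtain ⟨i, hi1, hi2, hi3, hi4⟩ := hspec.2 hrn
    have hR : PySem.Chars.rfind wrd.toList x.toList = (i : Int) := by
      exact hi1
    rw [hR]
    exact pv_loop_reach wrd x i hi2 hi3 (fun m h1 h2 => hi4 m h1 h2) (i + 1) (-1) le_rfl (by omega) (by omega)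

-- ===== VERDICT (by name: the statement is the Claim_ definition above) =====
theorem find_letters_spec : Claim_equal_find_letters := by
  intro wrd x loc _
  unfold Spec_find_letters find_letters find_letters_alt
  exact pv_loop_eq wrd x
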